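-- pv_equiv track=rewrite | github.com/leaprotocol/ai_garden | python_projects/training_next/demo5.py | find_token_span
-- ===== SOURCE A (Python) =====
-- def find_token_span(text: str, target: str) -> tuple:
--     """Find the first and last occurrence of target in text."""
--     words = text.split()
--     first_idx = -1
--     last_idx = -1
--
--     for i, word in enumerate(words):
--         if word == target:
--             if first_idx == -1:
--                 first_idx = i
--             last_idx = i
--
--     return first_idx, last_idx
-- ===== SOURCE B (Python) =====
-- def find_token_span(text: str, target: str) -> tuple:
--     """Find the first and last occurrence of target in text."""
--     words = text.split()
--     if target not in words:
--         return -1, -1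
--     return words.index(target), len(words) - 1 - words[::-1].index(target)
-- ===== Notes on version B (the rewrite author's own statement) =====
-- stated objective: alternative
-- what changed: Replaces the single forward loop that threads (first,last) state through every word with a membership test plus two independent directional searches: a front .index and a back search via the reversed list.
import Mathlib
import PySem

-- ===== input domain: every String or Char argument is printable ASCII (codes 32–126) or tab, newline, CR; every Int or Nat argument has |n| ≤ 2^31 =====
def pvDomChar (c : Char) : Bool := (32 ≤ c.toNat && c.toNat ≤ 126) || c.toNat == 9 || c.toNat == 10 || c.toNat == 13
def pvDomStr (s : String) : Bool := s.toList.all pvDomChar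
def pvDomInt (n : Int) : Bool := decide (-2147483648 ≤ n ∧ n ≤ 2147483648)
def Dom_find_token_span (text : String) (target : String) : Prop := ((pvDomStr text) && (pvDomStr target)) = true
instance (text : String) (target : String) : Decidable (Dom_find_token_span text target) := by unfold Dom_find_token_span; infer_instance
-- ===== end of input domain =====

-- B replaces A's single state-threading forward loop by a membership test plus two
-- independent directional searches (front .index, back .index on the reversed list);
-- alternative decomposition, same O(n) cost.


-- ===== PORT A =====
-- A: one forward loop over enumerate(words), threading (first_idx, last_idx).
def find_token_span (text : String) (target : String) : Int × Int :=
  let words := PySem.Str.split₀ text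
  (PySem.List.enumerate words 0).foldl
    (fun (st : Int × Int) (p : Int × String) =>
      if p.2 = target then
        ((if st.1 = -1 then p.1 else st.1), p.1)
      else st)
    (-1, -1)

-- ===== PORT B =====
-- B: membership guard, then words.index(target) and len(words)-1-words[::-1].index(target).
-- The membership guard makes both index? results `some`; `.getD 0` is never the default
-- (Python's .index would raise only when target is absent, which the guard excludes).
def find_token_span_alt (text : String) (target : String) : Int × Int :=
  let words := PySem.Str.split₀ text
  if target ∈ words then
    (((PySem.List.index? words target).getD 0 : Int),
     (words.length : Int) - 1 - ((PySem.List.index? words.reverse target).getD 0 : Int))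
  else (-1, -1)

-- ===== PRECONDITION & SPEC =====
def Spec_find_token_span (text : String) (target : String) (out : Int × Int) : Prop := out = find_token_span_alt text target
instance (text : String) (target : String) (out : Int × Int) : Decidable (Spec_find_token_span text target out) := by unfold Spec_find_token_span; infer_instance

-- ===== CLAIM (what is proved, stated in full; the proofs are below) =====
def Claim_equal_find_token_span : Prop := ∀ (text : String) (target : String), Dom_find_token_span text target → Spec_find_token_span text target (find_token_span text target)

-- ===== LEMMAS AND PROOFS =====

-- index of the LAST occurrence of t in ws (proof-only helper)
def lastIdx (t : String) : List String → Option Nat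
  | [] => none
  | w :: ws =>
    match lastIdx t ws with
    | some k => some (k + 1)
    | none => if w = t then some 0 else none

theorem lastIdx_eq_none_iff (t : String) (ws : List String) :
    lastIdx t ws = none ↔ t ∉ ws := by
  induction ws with
  | nil => simp [lastIdx]
  | cons w ws ih =>
    simp only [lastIdx, List.mem_cons]
    cases h : lastIdx t ws with
    | some k => simp [h] at ih ⊢; tauto
    | none =>
      simp [h] at ih
      by_cases hw : w = t <;> simp [hw, ih] <;> tauto

theorem loop_found (t : String) (ws : List String) (s f l : Int) (hf : f ≠ -1) :
    (PySem.List.enumerate ws s).foldl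
      (fun (st : Int × Int) (p : Int × String) =>
        if p.2 = t then ((if st.1 = -1 then p.1 else st.1), p.1) else st) (f, l)
    = (f, match lastIdx t ws with | some b => s + b | none => l) := by
  induction ws generalizing s l with
  | nil => simp [lastIdx]
  | cons w ws ih =>
    rw [PySem.List.enumerate_cons, List.foldl_cons]
    by_cases hw : w = t
    · simp only [hw, if_true, if_neg hf]
      rw [ih (s + 1) s]
      simp only [lastIdx]
      cases h : lastIdx t ws with
      | some k => simp only []; push_cast; ring_nf
      | none => simp
    · simp only [if_neg hw]
      rw [ih (s + 1) l]
      simp only [lastIdx]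
      cases h : lastIdx t ws with
      | some k => simp only []; push_cast; ring_nf
      | none => simp [hw]

theorem loop_char (t : String) (ws : List String) (s : Int) (hs : 0 ≤ s) :
    (PySem.List.enumerate ws s).foldl
      (fun (st : Int × Int) (p : Int × String) =>
        if p.2 = t then ((if st.1 = -1 then p.1 else st.1), p.1) else st) (-1, -1)
    = (match PySem.List.index? ws t, lastIdx t ws with
       | some a, some b => ((s + a : Int), (s + b : Int))
       | _, _ => (-1, -1)) := by
  induction ws generalizing s with
  | nil => simp [lastIdx, PySem.List.index?]
  | cons w ws ih =>
    rw [PySem.List.enumerate_cons, List.foldl_cons]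
    by_cases hw : w = t
    · simp only [hw, if_true]
      rw [loop_found t ws (s + 1) s s (by omega)]
      rw [show PySem.List.index? (t :: ws) t = some 0 from PySem.List.index?_cons_self t ws]
      simp only [lastIdx]
      cases h : lastIdx t ws with
      | some k => simp only [Nat.cast_zero, add_zero]; push_cast; ring_nf
      | none => simp
    · simp only [if_neg hw]
      rw [ih (s + 1) (by omega)]
      rw [PySem.List.index?_cons_of_ne ws hw]
      simp only [lastIdx]
      cases hi : PySem.List.index? ws t with
      | none =>
        have hni : t ∉ ws := (PySem.List.index?_eq_none_iff _ _).mp hi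
        rw [(lastIdx_eq_none_iff t ws).mpr hni]
        simp
      | some a =>
        have hmem : t ∈ ws := by rw [← PySem.List.index?_isSome_iff, hi]; rfl
        cases hl : lastIdx t ws with
        | none => exact absurd ((lastIdx_eq_none_iff t ws).mp hl) (by simpa using hmem)
        | some b =>
          simp only [Option.map_some, Prod.mk.injEq]
          constructor
          · push_cast; ring_nf
          · push_cast; ring_nf

theorem lastIdx_eq_rev_index (t : String) (ws : List String) :
    lastIdx t ws = (PySem.List.index? ws.reverse t).map (fun r => ws.length - 1 - r) := by
  induction ws with
  | nil => simp [lastIdx, PySem.List.index?]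
  | cons w ws ih =>
    simp only [lastIdx, List.reverse_cons]
    by_cases hmem : t ∈ ws
    · have hmemr : t ∈ ws.reverse := by simpa using hmem
      rw [PySem.List.index?_append_of_mem [w] hmemr]
      cases hr : PySem.List.index? ws.reverse t with
      | none => exact absurd ((PySem.List.index?_eq_none_iff _ _).mp hr) (by simpa using hmemr)
      | some r =>
        obtain ⟨hrlt, -, -⟩ := PySem.List.getElem_of_index?_eq_some hr
        rw [hr] at ih
        simp only [ih, Option.map_some]
        simp only [List.length_reverse] at hrlt
        have h1 : ws.length - 1 - r + 1 = (w :: ws).length - 1 - r := by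
          simp only [List.length_cons]; omega
        simp [h1]
    · have hmemr : t ∉ ws.reverse := by simpa using hmem
      rw [(lastIdx_eq_none_iff t ws).mpr hmem]
      by_cases hw : w = t
      · subst hw
        rw [PySem.List.index?_append_singleton_self ws.reverse w hmemr]
        simp
      · have hno : t ∉ ws.reverse ++ [w] := by
          simp only [List.mem_append, List.mem_singleton]
          rintro (h | h)
          · exact hmemr h
          · exact hw h.symm
        rw [(PySem.List.index?_eq_none_iff _ _).mpr hno]
        simp [hw]

-- ===== VERDICT (by name: the statement is the Claim_ definition above) =====
theorem find_token_span_spec : Claim_equal_find_token_span := by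
  intro text target _
  unfold Spec_find_token_span find_token_span find_token_span_alt
  set ws := PySem.Str.split₀ text with hws
  rw [loop_char target ws 0 le_rfl]
  by_cases hmem : target ∈ ws
  · cases hi : PySem.List.index? ws target with
    | none => exact absurd ((PySem.List.index?_eq_none_iff _ _).mp hi) (by simpa using hmem)
    | some a =>
      have hmemr : target ∈ ws.reverse := by simpa using hmem
      cases hr : PySem.List.index? ws.reverse target with
      | none => exact absurd ((PySem.List.index?_eq_none_iff _ _).mp hr) (by simpa using hmemr)
      | some r =>
        obtain ⟨hrlt, -, -⟩ := PySem.List.getElem_of_index?_eq_some hr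
        simp only [List.length_reverse] at hrlt
        rw [lastIdx_eq_rev_index, hr]
        simp only [Option.map_some, if_pos hmem, hi, hr, Option.getD_some, Prod.mk.injEq]
        constructor <;> omega
  · rw [(PySem.List.index?_eq_none_iff _ _).mpr hmem]
    simp [hmem]
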